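-- pv_equiv track=rewrite | github.com/pypi-data/pypi-mirror-399 | packages/drf-to-mkdoc/drf_to_mkdoc-0.4.1-py3-none-any.whl/drf_to_mkdoc/management/commands/generate_doc_json.py | _paths_match_pattern
-- ===== SOURCE A (Python) =====
-- def _paths_match_pattern(django_path, openapi_path):
--     """
--     Check if paths match by comparing structure, ignoring parameter name differences.
--     E.g., /path/{pk}/ matches /path/{id}/
--     """
--     # Split paths into segments
--     django_segments = [s for s in django_path.split("/") if s]
--     openapi_segments = [s for s in openapi_path.split("/") if s]
--
--     # Must have same number of segments
--     if len(django_segments) != len(openapi_segments):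
--         return False
--
--     # Compare each segment
--     for django_seg, openapi_seg in zip(django_segments, openapi_segments, strict=False):
--         # If both are parameters (start with {), they match
--         if (
--             django_seg.startswith("{") and openapi_seg.startswith("{")
--         ) or django_seg == openapi_seg:
--             continue
--         return False
--
--     return True
-- ===== SOURCE B (Python) =====
-- def _paths_match_pattern(django_path, openapi_path):
--     # Single char-level two-pointer scan: no segment lists are built; runs of '/'
--     # are skipped in both strings, '{'-opened segments are skipped as wildcards,
--     # other segments are compared character by character.
--     a, b = django_path, openapi_path
--     la, lb = len(a), len(b)
--     i = j = 0
--     while True: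
--         while i < la and a[i] == "/":
--             i += 1
--         while j < lb and b[j] == "/":
--             j += 1
--         if i == la and j == lb:
--             return True
--         if i == la or j == lb:
--             return False
--         if a[i] == "{" and b[j] == "{":
--             while i < la and a[i] != "/":
--                 i += 1
--             while j < lb and b[j] != "/":
--                 j += 1
--             continue
--         while i < la and j < lb and a[i] != "/" and b[j] != "/":
--             if a[i] != b[j]:
--                 return False
--             i += 1
--             j += 1
--         a_end = i == la or a[i] == "/"
--         b_end = j == lb or b[j] == "/"
--         if not (a_end and b_end):
--             return False
-- ===== Notes on version B (the rewrite author's own statement) =====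
-- stated objective: alternative
-- what changed: Replaced A's split-into-segment-lists plus length-guard plus zip loop by a single character-level two-pointer scan over the two strings that allocates no segment lists: it skips runs of '/', skips '{'-opened segments in lockstep, and compares other segments character by character.
import Mathlib
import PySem

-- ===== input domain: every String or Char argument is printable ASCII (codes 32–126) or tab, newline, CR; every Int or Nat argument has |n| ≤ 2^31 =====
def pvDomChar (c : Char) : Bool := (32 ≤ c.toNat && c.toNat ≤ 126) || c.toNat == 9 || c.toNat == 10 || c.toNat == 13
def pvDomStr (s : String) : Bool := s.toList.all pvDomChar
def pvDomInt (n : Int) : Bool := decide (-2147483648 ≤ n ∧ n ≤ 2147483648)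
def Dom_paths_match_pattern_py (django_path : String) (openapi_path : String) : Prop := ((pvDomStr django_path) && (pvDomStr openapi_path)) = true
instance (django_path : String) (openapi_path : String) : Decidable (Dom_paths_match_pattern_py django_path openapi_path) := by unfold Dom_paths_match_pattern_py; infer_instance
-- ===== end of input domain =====

-- B replaces A's split-into-segment-lists + length guard + zip loop by a single character-level
-- two-pointer scan over the two strings that never builds segment lists (objective: alternative).

-- ===== PORT A =====
-- [s for s in p.split("/") if s]
def pvA_segments (p : String) : List String :=
  ((PySem.Str.split? p "/").getD []).filter (fun s => !(s == ""))

-- the 'for django_seg, openapi_seg in zip(...)' loop with its continue/return False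
def pvA_loop : List (String × String) → Bool
  | [] => true
  | (d, o) :: rest =>
    if (PySem.Str.startswith d "{" && PySem.Str.startswith o "{") || d == o then pvA_loop rest
    else false

def paths_match_pattern_py (django_path : String) (openapi_path : String) : Bool :=
  let django_segments := pvA_segments django_path
  let openapi_segments := pvA_segments openapi_path
  if django_segments.length ≠ openapi_segments.length then false
  else pvA_loop (django_segments.zip openapi_segments)

-- ===== PORT B =====
-- Source B's outer 'while True' loop (pvB_match: skip '/' runs, end test, '{'-skip branch) and its
-- inner literal-compare loop with the segment-end check (pvB_seg), as mutual tail recursion over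
-- the two string suffixes (= the two indices i, j).
mutual
def pvB_match (a b : List Char) : Bool :=
  match h1 : a.dropWhile (· == '/'), h2 : b.dropWhile (· == '/') with
  | [], [] => true
  | [], _ :: _ => false
  | _ :: _, [] => false
  | x :: xs, y :: ys =>
    if x == '{' && y == '{' then
      pvB_match ((x :: xs).dropWhile (· != '/')) ((y :: ys).dropWhile (· != '/'))
    else
      pvB_seg (x :: xs) (y :: ys)
termination_by (a.length + b.length, 1)
decreasing_by
  · apply Prod.Lex.left
    have ha : (x :: xs).length ≤ a.length := h1 ▸ a.length_dropWhile_le (· == '/')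
    have hb : (y :: ys).length ≤ b.length := h2 ▸ b.length_dropWhile_le (· == '/')
    have ha2 : ((x :: xs).dropWhile (· != '/')).length ≤ (x :: xs).length :=
      (x :: xs).length_dropWhile_le (· != '/')
    have hb2 : ((y :: ys).dropWhile (· != '/')).length ≤ (y :: ys).length :=
      (y :: ys).length_dropWhile_le (· != '/')
    have hx : x = '{' := by
      rename_i hcond; simp only [Bool.and_eq_true, beq_iff_eq] at hcond; exact hcond.1
    have hdx : (x :: xs).dropWhile (· != '/') = xs.dropWhile (· != '/') := by
      subst hx; simp [List.dropWhile]
    have : ((x :: xs).dropWhile (· != '/')).length < (x :: xs).length := by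
      rw [hdx]; have := xs.length_dropWhile_le (· != '/'); simp; omega
    simp only [List.length_cons] at *
    omega
  · apply Prod.Lex.right'
    · have ha : (x :: xs).length ≤ a.length := h1 ▸ a.length_dropWhile_le (· == '/')
      have hb : (y :: ys).length ≤ b.length := h2 ▸ b.length_dropWhile_le (· == '/')
      omega
    · omega

def pvB_seg (a b : List Char) : Bool :=
  match a, b with
  | [], [] => true
  | [], y :: ys => if y == '/' then pvB_match [] ys else false
  | x :: xs, [] => if x == '/' then pvB_match xs [] else false
  | x :: xs, y :: ys =>
    if x == '/' then
      if y == '/' then pvB_match xs (y :: ys) else false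
    else if y == '/' then false
    else if x == y then pvB_seg xs ys else false
termination_by (a.length + b.length, 0)
decreasing_by
  all_goals (apply Prod.Lex.left; simp; try omega)
end

def paths_match_pattern_py_alt (django_path : String) (openapi_path : String) : Bool :=
  pvB_match django_path.toList openapi_path.toList

-- ===== PRECONDITION & SPEC =====
def Spec_paths_match_pattern_py (django_path : String) (openapi_path : String) (out : Bool) : Prop := out = paths_match_pattern_py_alt django_path openapi_path
instance (django_path : String) (openapi_path : String) (out : Bool) : Decidable (Spec_paths_match_pattern_py django_path openapi_path out) := by unfold Spec_paths_match_pattern_py; infer_instance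

-- ===== CLAIM (what is proved, stated in full; the proofs are below) =====
def Claim_equal_paths_match_pattern_py : Prop := ∀ (django_path : String) (openapi_path : String), Dom_paths_match_pattern_py django_path openapi_path → Spec_paths_match_pattern_py django_path openapi_path (paths_match_pattern_py django_path openapi_path)

-- ===== LEMMAS AND PROOFS =====

-- the pieces of l.split('/'), empty pieces included
def pvPieces : List Char → List (List Char)
  | [] => [[]]
  | c :: r => if c = '/' then [] :: pvPieces r else (pvPieces r).modifyHead (c :: ·)

-- the nonempty pieces (what A's comprehension keeps)
def pvFsegs (l : List Char) : List (List Char) := (pvPieces l).filter (fun s => !s.isEmpty)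

-- A's guarded zip loop, rephrased on char lists: comparison of two segment lists
def pvCmp : List (List Char) → List (List Char) → Bool
  | [], [] => true
  | [], _ :: _ => false
  | _ :: _, [] => false
  | d :: ds, o :: os =>
    if ((d.head? == some '{') && (o.head? == some '{')) || d == o then pvCmp ds os else false

-- the tail of the piece list after the first piece
def pvTail (l : List Char) : List (List Char) :=
  match l.dropWhile (· != '/') with
  | [] => []
  | _ :: r => pvPieces r

theorem pvPieces_ne_nil (l : List Char) : pvPieces l ≠ [] := by
  induction l with
  | nil => simp [pvPieces]
  | cons c r ih =>
    simp only [pvPieces]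
    split
    · simp
    · cases h : pvPieces r with
      | nil => exact absurd h ih
      | cons p ps => simp [List.modifyHead]

theorem pvGo_eval (fuel : Nat) : ∀ (l cur : List Char) (accs : List (List Char)),
    l.length ≤ fuel →
    PySem.Chars.splitOn.go ['/'] fuel l cur accs
      = accs.reverse ++ (pvPieces l).modifyHead (cur.reverse ++ ·) := by
  induction fuel with
  | zero =>
    intro l cur accs h
    have hl : l = [] := by cases l with | nil => rfl | cons c r => simp at h
    subst hl
    simp [PySem.Chars.splitOn.go, pvPieces]
  | succ fuel ih =>
    intro l cur accs h
    cases l with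
    | nil => simp [PySem.Chars.splitOn.go, pvPieces]
    | cons c rest =>
      by_cases hc : c = '/'
      · subst hc
        have hpre : List.isPrefixOf ['/'] ('/' :: rest) = true := by
          simp [List.isPrefixOf]
        rw [PySem.Chars.splitOn.go]
        simp only [hpre, if_true]
        rw [show (List.drop ['/'].length ('/' :: rest) : List Char) = rest from rfl]
        rw [ih rest [] (cur.reverse :: accs) (by simpa using Nat.le_of_succ_le_succ h)]
        simp [pvPieces]
        cases hp : pvPieces rest with
        | nil => exact absurd hp (pvPieces_ne_nil rest)
        | cons p ps => simp [List.modifyHead]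
      · have hpre : List.isPrefixOf ['/'] (c :: rest) = false := by
          simp [List.isPrefixOf]
          intro h'; exact hc h'.symm
        rw [PySem.Chars.splitOn.go]
        simp only [hpre, Bool.false_eq_true, if_false]
        rw [ih rest (c :: cur) accs (by simpa using Nat.le_of_succ_le_succ h)]
        simp only [pvPieces, hc, if_false]
        cases hp : pvPieces rest with
        | nil => exact absurd hp (pvPieces_ne_nil rest)
        | cons p ps => simp [List.modifyHead]

theorem pvSplitOn_eq_pieces (l : List Char) : PySem.Chars.splitOn l ['/'] = pvPieces l := by
  unfold PySem.Chars.splitOn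
  rw [pvGo_eval (l.length + 1) l [] [] (by omega)]
  cases hp : pvPieces l with
  | nil => exact absurd hp (pvPieces_ne_nil l)
  | cons p ps => simp [List.modifyHead]

-- piece-list structure lemmas
theorem pv_head_dropWhile {p : Char → Bool} {l : List Char} {x : Char} {xs : List Char}
    (h : l.dropWhile p = x :: xs) : p x = false := by
  induction l with
  | nil => simp [List.dropWhile] at h
  | cons c r ih =>
    rw [List.dropWhile_cons] at h
    by_cases hp : p c = true
    · rw [if_pos hp] at h
      exact ih h
    · rw [if_neg hp] at h
      cases h
      simpa using hp

theorem pvPieces_split (l : List Char) :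
    pvPieces l = (l.takeWhile (· != '/')) :: pvTail l := by
  induction l with
  | nil => simp [pvPieces, pvTail, List.dropWhile]
  | cons c r ih =>
    by_cases hc : c = '/'
    · subst hc
      simp [pvPieces, pvTail, List.takeWhile_cons, List.dropWhile_cons]
    · simp only [pvPieces, hc, if_false]
      rw [ih]
      simp [pvTail, List.takeWhile_cons, List.dropWhile_cons, hc, List.modifyHead]

theorem pvFsegs_nil : pvFsegs [] = [] := by simp [pvFsegs, pvPieces]

theorem pvFsegs_slash (r : List Char) : pvFsegs ('/' :: r) = pvFsegs r := by
  simp [pvFsegs, pvPieces]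

theorem pvFsegs_tail (l : List Char) :
    (pvTail l).filter (fun s => !s.isEmpty) = pvFsegs (l.dropWhile (· != '/')) := by
  cases h : l.dropWhile (· != '/') with
  | nil => simp [pvTail, h, pvFsegs_nil]
  | cons dc r =>
    have hd := pv_head_dropWhile (p := (· != '/')) h
    have hd' : dc = '/' := by simpa using hd
    subst hd'
    rw [pvFsegs_slash]
    simp only [pvTail, h]
    rfl

theorem pvFsegs_cons {c : Char} (r : List Char) (hc : c ≠ '/') :
    pvFsegs (c :: r)
      = ((c :: r).takeWhile (· != '/')) :: pvFsegs ((c :: r).dropWhile (· != '/')) := by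
  have hsplit := pvPieces_split (c :: r)
  unfold pvFsegs
  rw [hsplit]
  have hne : ((c :: r).takeWhile (· != '/')).isEmpty = false := by
    simp [List.takeWhile_cons, hc]
  rw [List.filter_cons]
  simp only [hne, Bool.not_false, if_true]
  rw [pvFsegs_tail]
  rfl

theorem pvFsegs_dropSlash (l : List Char) :
    pvFsegs (l.dropWhile (· == '/')) = pvFsegs l := by
  induction l with
  | nil => simp
  | cons c r ih =>
    by_cases hc : c = '/'
    · subst hc
      simpa [List.dropWhile_cons, pvFsegs_slash] using ih
    · simp [List.dropWhile_cons, hc]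

-- B-port structure lemmas
theorem pvB_match_slash_left (a b : List Char) :
    pvB_match ('/' :: a) b = pvB_match a b := by
  rw [pvB_match.eq_def, pvB_match.eq_def (a := a)]
  rw [List.dropWhile_cons_of_pos (by simp)]

theorem pvB_match_slash_right (a b : List Char) :
    pvB_match a ('/' :: b) = pvB_match a b := by
  rw [pvB_match.eq_def, pvB_match.eq_def (b := b)]
  rw [List.dropWhile_cons_of_pos (by simp)]

theorem pvB_match_nil : pvB_match [] [] = true := by
  rw [pvB_match.eq_def]
  rfl

theorem pvB_seg_eq (a : List Char) : ∀ b : List Char,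
    pvB_seg a b
      = (if a.takeWhile (· != '/') = b.takeWhile (· != '/')
         then pvB_match (a.dropWhile (· != '/')) (b.dropWhile (· != '/'))
         else false) := by
  induction a with
  | nil =>
    intro b
    cases b with
    | nil => simp [pvB_seg, pvB_match_nil]
    | cons y ys =>
      by_cases hy : y = '/'
      · subst hy
        simp [pvB_seg, List.takeWhile_cons, List.dropWhile_cons, pvB_match_slash_right]
      · simp [pvB_seg, List.takeWhile_cons, List.dropWhile_cons, hy]
  | cons x xs ih =>
    intro b
    cases b with
    | nil =>
      by_cases hx : x = '/'
      · subst hx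
        simp [pvB_seg, List.takeWhile_cons, List.dropWhile_cons, pvB_match_slash_left]
      · simp [pvB_seg, List.takeWhile_cons, List.dropWhile_cons, hx]
    | cons y ys =>
      by_cases hx : x = '/'
      · subst hx
        by_cases hy : y = '/'
        · subst hy
          simp [pvB_seg, List.takeWhile_cons, List.dropWhile_cons, pvB_match_slash_left]
        · simp [pvB_seg, List.takeWhile_cons, List.dropWhile_cons, hy]
      · by_cases hy : y = '/'
        · subst hy
          simp [pvB_seg, List.takeWhile_cons, List.dropWhile_cons, hx]
        · by_cases hxy : x = y
          · subst hxy
            simp [pvB_seg, List.takeWhile_cons, List.dropWhile_cons, hx, ih]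
          · simp [pvB_seg, List.takeWhile_cons, List.dropWhile_cons, hx, hy, hxy]

-- main characterisation of the B port: it computes A's segment comparison
theorem pvB_main (n : Nat) : ∀ a b : List Char, a.length + b.length ≤ n →
    pvB_match a b = pvCmp (pvFsegs a) (pvFsegs b) := by
  induction n with
  | zero =>
    intro a b h
    have ha : a = [] := by cases a with | nil => rfl | cons c r => simp at h
    have hb : b = [] := by cases b with | nil => rfl | cons c r => simp at h
    subst ha; subst hb
    rw [pvB_match.eq_def]
    simp [pvFsegs_nil, pvCmp]
  | succ n ih =>
    intro a b h
    rw [pvB_match.eq_def]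
    cases h1 : a.dropWhile (· == '/') with
    | nil =>
      cases h2 : b.dropWhile (· == '/') with
      | nil =>
        rw [← pvFsegs_dropSlash a, ← pvFsegs_dropSlash b, h1, h2, pvFsegs_nil]
        rfl
      | cons y ys =>
        have hy : y ≠ '/' := by
          have := pv_head_dropWhile h2; simpa using this
        rw [← pvFsegs_dropSlash a, ← pvFsegs_dropSlash b, h1, h2, pvFsegs_nil,
          pvFsegs_cons ys hy]
        rfl
    | cons x xs =>
      have hx : x ≠ '/' := by
        have := pv_head_dropWhile h1; simpa using this
      cases h2 : b.dropWhile (· == '/') with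
      | nil =>
        rw [← pvFsegs_dropSlash a, ← pvFsegs_dropSlash b, h1, h2, pvFsegs_nil,
          pvFsegs_cons xs hx]
        rfl
      | cons y ys =>
        have hy : y ≠ '/' := by
          have := pv_head_dropWhile h2; simpa using this
        have hla : (x :: xs).length ≤ a.length := h1 ▸ a.length_dropWhile_le (· == '/')
        have hlb : (y :: ys).length ≤ b.length := h2 ▸ b.length_dropWhile_le (· == '/')
        rw [← pvFsegs_dropSlash a, ← pvFsegs_dropSlash b, h1, h2,
          pvFsegs_cons xs hx, pvFsegs_cons ys hy]
        by_cases hbr : x = '{' ∧ y = '{'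
        · obtain ⟨hbx, hby⟩ := hbr
          subst hbx; subst hby
          simp only [beq_self_eq_true, Bool.and_self, if_true]
          rw [ih _ _ (by
            have h3 : ((('{' : Char) :: xs).dropWhile (· != '/')).length ≤ xs.length := by
              simpa [List.dropWhile_cons] using xs.length_dropWhile_le (· != '/')
            have h4 : ((('{' : Char) :: ys).dropWhile (· != '/')).length ≤ ys.length := by
              simpa [List.dropWhile_cons] using ys.length_dropWhile_le (· != '/')
            simp only [List.length_cons] at hla hlb
            omega)]
          simp [pvCmp, List.takeWhile_cons]
        · have hcond : (x == '{' && y == '{') = false := by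
            rcases Decidable.em (x = '{') with hx' | hx'
            · rcases Decidable.em (y = '{') with hy' | hy'
              · exact absurd ⟨hx', hy'⟩ hbr
              · simp [hy']
            · simp [hx']
          simp only [hcond, Bool.false_eq_true, if_false]
          rw [pvB_seg_eq]
          by_cases heq : (x :: xs).takeWhile (· != '/') = (y :: ys).takeWhile (· != '/')
          · simp only [heq, if_true]
            rw [ih _ _ (by
              have h3 : ((x :: xs).dropWhile (· != '/')).length ≤ xs.length := by
                rw [List.dropWhile_cons_of_pos (by simp [hx])]
                exact xs.length_dropWhile_le (· != '/')
              have h4 : ((y :: ys).dropWhile (· != '/')).length ≤ ys.length := by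
                rw [List.dropWhile_cons_of_pos (by simp [hy])]
                exact ys.length_dropWhile_le (· != '/')
              simp only [List.length_cons] at hla hlb
              omega)]
            simp [pvCmp]
          · simp only [heq, if_false]
            have hhead : (((x :: xs).takeWhile (· != '/')).head? == some '{'
                && ((y :: ys).takeWhile (· != '/')).head? == some '{') = false := by
              simp only [List.takeWhile_cons]
              simp only [bne_iff_ne, ne_eq, hx, not_false_iff, if_pos, hy]
              rcases Decidable.em (x = '{') with hx' | hx'
              · rcases Decidable.em (y = '{') with hy' | hy'
                · exact absurd ⟨hx', hy'⟩ hbr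
                · simp [List.head?, hy']
              · simp [List.head?, hx']
            have hbeq : ((x :: xs).takeWhile (· != '/') == (y :: ys).takeWhile (· != '/')) = false := by
              simpa using heq
            simp [pvCmp, hhead, hbeq]

-- A-side bridging lemmas
theorem pv_startswith_singleton (cs : List Char) (c : Char) :
    PySem.Chars.startswith cs [c] = (cs.head? == some c) := by
  cases cs with
  | nil => simp [PySem.Chars.startswith, List.isPrefixOf]
  | cons a as => simp [PySem.Chars.startswith, List.isPrefixOf, List.head?, BEq.comm]

theorem pv_str_beq (d o : String) : (d == o) = (d.toList == o.toList) := by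
  rcases Decidable.em (d = o) with h | h
  · subst h; simp
  · have h2 : d.toList ≠ o.toList := fun hh => h (String.toList_inj.mp hh)
    simp [h, h2]

theorem pv_str_empty (s : String) : (s == "") = s.toList.isEmpty := by
  rcases Decidable.em (s = "") with h | h
  · subst h; decide
  · have h2 : s.toList ≠ [] := by
      intro hh
      exact h (String.toList_inj.mp (by simpa using hh))
    have e1 : (s == "") = false := beq_eq_false_iff_ne.mpr h
    have e2 : s.toList.isEmpty = false := by simpa [List.isEmpty_iff] using h2
    rw [e1, e2]

theorem pv_startswith_brace (s : String) :
    PySem.Str.startswith s "{" = (s.toList.head? == some '{') := by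
  rw [PySem.Str.startswith_eq]
  rw [show ("{" : String).toList = ['{'] from by decide]
  exact pv_startswith_singleton s.toList '{'

theorem pvA_main (ds : List String) : ∀ os : List String,
    (if ds.length ≠ os.length then false else pvA_loop (ds.zip os))
      = pvCmp (ds.map String.toList) (os.map String.toList) := by
  induction ds with
  | nil =>
    intro os
    cases os with
    | nil => simp [pvA_loop, pvCmp]
    | cons o os => simp [pvCmp]
  | cons d ds ih =>
    intro os
    cases os with
    | nil => simp [pvCmp]
    | cons o os =>
      have hcond : ((PySem.Str.startswith d "{" && PySem.Str.startswith o "{") || d == o)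
          = ((d.toList.head? == some '{' && o.toList.head? == some '{')
              || (d.toList == o.toList)) := by
        rw [pv_str_beq, pv_startswith_brace, pv_startswith_brace]
      by_cases hl : ds.length = os.length
      · rw [if_neg (by simp [hl])]
        have ihl : pvA_loop (ds.zip os) = pvCmp (ds.map String.toList) (os.map String.toList) := by
          rw [← ih os, if_neg (by simp [hl])]
        simp only [List.zip_cons_cons, pvA_loop, List.map_cons, pvCmp, hcond]
        split
        · exact ihl
        · rfl
      · have hfalse : pvCmp (ds.map String.toList) (os.map String.toList) = false := by
          rw [← ih os, if_pos (by simpa using hl)]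
        rw [if_pos (by simp [hl])]
        simp only [List.map_cons, pvCmp, hfalse]
        split <;> rfl

theorem pvA_segments_map (p : String) :
    (pvA_segments p).map String.toList = pvFsegs p.toList := by
  unfold pvA_segments
  obtain ⟨L, hL, hmap⟩ : ∃ L, PySem.Str.split? p "/" = some L ∧
      L.map String.toList = PySem.Chars.splitOn p.toList ['/'] := by
    have h := PySem.Str.split?_map p "/"
    rw [show ("/" : String).toList = ['/'] from by decide] at h
    rw [show PySem.Chars.split? p.toList ['/']
        = some (PySem.Chars.splitOn p.toList ['/']) from by simp [PySem.Chars.split?]] at h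
    cases hs : PySem.Str.split? p "/" with
    | none => rw [hs] at h; simp at h
    | some L => rw [hs] at h; exact ⟨L, rfl, by simpa using h⟩
  rw [hL]
  simp only [Option.getD_some]
  rw [pvSplitOn_eq_pieces] at hmap
  unfold pvFsegs
  rw [← hmap, List.filter_map]
  congr 1
  apply List.filter_congr
  intro s _
  simp [pv_str_empty]

-- ===== VERDICT (by name: the statement is the Claim_ definition above) =====
theorem paths_match_pattern_py_spec : Claim_equal_paths_match_pattern_py := by
  intro d o _
  unfold Spec_paths_match_pattern_py paths_match_pattern_py paths_match_pattern_py_alt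
  rw [pvB_main (d.toList.length + o.toList.length) d.toList o.toList (le_refl _)]
  rw [← pvA_segments_map, ← pvA_segments_map]
  exact pvA_main (pvA_segments d) (pvA_segments o)
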